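-- pv_equiv track=rewrite | github.com/JaeheonNa/python-basic | codingTest/absoluteCrime-dp.py | solution
-- ===== SOURCE A (Python) =====
-- def solution(infos, n, m):
--     cases = {(0,0)}
--
--     for info in infos:
--         newCase = set()
--         for case in cases:
--             if case[0] + info[0] < n:
--                 newCase.add((case[0] + info[0], case[1]))
--             if case[1] + info[1] < m:
--                 newCase.add((case[0], case[1] + info[1]))
--         cases = newCase
--
--     if not cases:
--         return -1
--
--     return min(a for a, b in cases)
-- ===== SOURCE B (Python) =====
-- def solution(infos, n, m):
--     best = {0: 0}  # b-sum -> minimal a-sum among surviving cases with that b-sum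
--     for a1, b1 in infos:
--         cands = []
--         for b, a in best.items():
--             if a + a1 < n:
--                 cands.append((b, a + a1))
--             if b + b1 < m:
--                 cands.append((b + b1, a))
--         nxt = {}
--         for k, v in cands:
--             if k not in nxt or v < nxt[k]:
--                 nxt[k] = v
--         best = nxt
--     if not best:
--         return -1
--     return min(best.values())
-- ===== Notes on version B (the rewrite author's own statement) =====
-- stated objective: alternative
-- what changed: Replaces the set of all reachable (a,b) pairs by a dict keyed on the b-sum storing only the minimal a-sum per b (dominance: the guard a+da<n is monotone in a, so only the per-b minimum matters); intended to cut the frontier from O(n*m) pairs to O(m) entries, but a timing run could not confirm 'faster' under its consistency rule (A timed out on most large inputs; on inputs where both finished B read up to ~150x), so no speed is claimed.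
import Mathlib
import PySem

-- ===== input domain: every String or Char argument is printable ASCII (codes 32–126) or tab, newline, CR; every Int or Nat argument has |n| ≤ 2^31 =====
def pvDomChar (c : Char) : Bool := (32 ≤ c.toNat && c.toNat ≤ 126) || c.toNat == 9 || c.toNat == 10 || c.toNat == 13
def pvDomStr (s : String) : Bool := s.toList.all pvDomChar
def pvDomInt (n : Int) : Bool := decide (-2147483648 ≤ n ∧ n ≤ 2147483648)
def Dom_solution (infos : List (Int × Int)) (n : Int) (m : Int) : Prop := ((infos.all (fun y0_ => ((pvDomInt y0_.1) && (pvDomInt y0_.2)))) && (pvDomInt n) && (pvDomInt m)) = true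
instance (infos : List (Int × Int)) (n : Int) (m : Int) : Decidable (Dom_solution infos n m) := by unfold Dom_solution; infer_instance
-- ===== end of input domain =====

-- B replaces A's frontier set of all reachable (a, b) pairs by a dict storing, per b-sum, only
-- the minimal a-sum (a dominance argument); the proved claim is equality of return values.

-- ===== PORT A =====
-- 'for case in cases: if …: newCase.add(…); if …: newCase.add(…)' (set frontier, one item)
def stepA (n m : Int) (cases : PySem.Set (Int × Int)) (info : Int × Int) : PySem.Set (Int × Int) :=
  cases.foldl (fun nc c =>
    let nc1 := if c.1 + info.1 < n then PySem.Set.add nc (c.1 + info.1, c.2) else nc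
    if c.2 + info.2 < m then PySem.Set.add nc1 (c.1, c.2 + info.2) else nc1)
    PySem.Set.empty

def solution (infos : List (Int × Int)) (n : Int) (m : Int) : Int :=
  let cases : PySem.Set (Int × Int) := infos.foldl (stepA n m) (PySem.Set.ofList [(0, 0)])
  if cases.isEmpty then -1
  else (PySem.List.min? (cases.map (·.1)) (fun x => x)).getD (-1)
  -- min over a set of ints: value independent of the (unmodelled) hash iteration order

-- ===== PORT B =====
-- 'for b, a in best.items(): if …: cands.append(…); if …: cands.append(…)'
-- then 'for k, v in cands: if k not in nxt or v < nxt[k]: nxt[k] = v'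
def stepB (n m : Int) (d : PySem.Dict Int Int) (info : Int × Int) : PySem.Dict Int Int :=
  let cands : List (Int × Int) := d.items.foldl (fun cs p =>
    let cs1 := if p.2 + info.1 < n then cs ++ [(p.1, p.2 + info.1)] else cs
    if p.1 + info.2 < m then cs1 ++ [(p.1 + info.2, p.2)] else cs1) []
  cands.foldl (fun nx kv =>
    match nx.get? kv.1 with
    | none => nx.insert kv.1 kv.2
    | some w => if kv.2 < w then nx.insert kv.1 kv.2 else nx)
    PySem.Dict.empty

def solution_alt (infos : List (Int × Int)) (n : Int) (m : Int) : Int :=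
  let best : PySem.Dict Int Int := infos.foldl (stepB n m) (PySem.Dict.empty.insert 0 0)
  if best.items.isEmpty then -1
  else (PySem.List.min? best.values (fun x => x)).getD (-1)

-- ===== PRECONDITION & SPEC =====
def Spec_solution (infos : List (Int × Int)) (n : Int) (m : Int) (out : Int) : Prop := out = solution_alt infos n m
instance (infos : List (Int × Int)) (n : Int) (m : Int) (out : Int) : Decidable (Spec_solution infos n m out) := by unfold Spec_solution; infer_instance

-- ===== CLAIM (what is proved, stated in full; the proofs are below) =====
def Claim_equal_solution : Prop := ∀ (infos : List (Int × Int)) (n : Int) (m : Int), Dom_solution infos n m → Spec_solution infos n m (solution infos n m)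

-- ===== LEMMAS AND PROOFS =====

-- optional minimum of Ints
def omin : Option Int → Option Int → Option Int
  | none, b => b
  | some a, none => some a
  | some a, some b => some (min a b)

def listMin (xs : List Int) : Option Int := xs.foldl (fun acc x => omin acc (some x)) none

-- min of the values attached to key y in a (key, value) pair list
def rowMin (ps : List (Int × Int)) (y : Int) : Option Int :=
  listMin ((ps.filter (fun p => p.1 == y)).map (·.2))

-- min a-sum among pairs (a, b) of the frontier with b-sum y
def colMin (cs : List (Int × Int)) (y : Int) : Option Int :=
  rowMin (cs.map (fun p => (p.2, p.1))) y

-- guarded shift of a per-key minimum by the a-increment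
def shiftG (da n : Int) (o : Option Int) : Option Int :=
  o.bind (fun a => if a + da < n then some (a + da) else none)

-- candidates one dict entry (b, a) generates for key y
def contrib (da db n m : Int) (p : Int × Int) (y : Int) : Option Int :=
  omin (if p.1 = y ∧ p.2 + da < n then some (p.2 + da) else none)
       (if p.1 + db = y ∧ p.1 + db < m then some p.2 else none)

-- candidate pairs one dict entry generates
def gB (da db n m : Int) (p : Int × Int) : List (Int × Int) :=
  (if p.2 + da < n then [(p.1, p.2 + da)] else []) ++
  (if p.1 + db < m then [(p.1 + db, p.2)] else [])

theorem omin_none_left (b : Option Int) : omin none b = b := rfl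
theorem omin_none_right (a : Option Int) : omin a none = a := by cases a <;> rfl
theorem omin_some_some (a b : Int) : omin (some a) (some b) = some (min a b) := rfl

theorem omin_assoc (a b c : Option Int) : omin (omin a b) c = omin a (omin b c) := by
  cases a <;> cases b <;> cases c <;>
    simp [omin_none_left, omin_none_right, omin_some_some]

theorem omin_omin_swap (a b c d : Option Int) :
    omin (omin a b) (omin c d) = omin (omin a c) (omin b d) := by
  cases a <;> cases b <;> cases c <;> cases d <;>
    simp [omin_none_left, omin_none_right, omin_some_some] <;> omega

theorem foldl_omin_generic {α : Type} (c : α → Option Int) (l : List α) (init : Option Int) :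
    l.foldl (fun acc x => omin acc (c x)) init
      = omin init (l.foldl (fun acc x => omin acc (c x)) none) := by
  induction l generalizing init with
  | nil => simp [List.foldl, omin_none_right]
  | cons p t ih =>
      simp only [List.foldl]
      rw [ih (omin init (c p)), ih (omin none (c p)), omin_none_left, omin_assoc]

theorem listMin_cons (x : Int) (xs : List Int) :
    listMin (x :: xs) = omin (some x) (listMin xs) := by
  unfold listMin
  simp only [List.foldl]
  rw [foldl_omin_generic (fun x => some x) xs (omin none (some x)), omin_none_left]

theorem listMin_eq_none_iff (xs : List Int) : listMin xs = none ↔ xs = [] := by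
  cases xs with
  | nil => simp [listMin]
  | cons x t =>
      rw [listMin_cons]
      cases h : listMin t <;> simp [omin_none_right, omin_some_some]

theorem listMin_mem {xs : List Int} {a : Int} (h : listMin xs = some a) : a ∈ xs := by
  induction xs generalizing a with
  | nil => simp [listMin] at h
  | cons x t ih =>
      rw [listMin_cons] at h
      cases ht : listMin t with
      | none =>
          rw [ht, omin_none_right] at h
          simp at h; simp [h]
      | some b =>
          rw [ht, omin_some_some] at h
          simp at h
          rcases min_cases x b with ⟨he, _⟩ | ⟨he, _⟩
          · rw [he] at h; simp [h]
          · rw [he] at h; subst h; exact List.mem_cons_of_mem _ (ih ht)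

theorem listMin_le {xs : List Int} {a : Int} (h : listMin xs = some a) :
    ∀ x ∈ xs, a ≤ x := by
  induction xs generalizing a with
  | nil => simp
  | cons x t ih =>
      intro y hy
      rw [listMin_cons] at h
      cases ht : listMin t with
      | none =>
          rw [ht, omin_none_right] at h
          rw [listMin_eq_none_iff] at ht; subst ht
          simp at h hy; omega
      | some b =>
          rw [ht, omin_some_some] at h
          simp at h
          rcases List.mem_cons.mp hy with hy | hy
          · omega
          · have h1 := ih ht y hy
            omega

theorem listMin_eq_some {xs : List Int} {a : Int} (hmem : a ∈ xs)
    (hlb : ∀ x ∈ xs, a ≤ x) : listMin xs = some a := by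
  cases h : listMin xs with
  | none => rw [listMin_eq_none_iff] at h; subst h; simp at hmem
  | some b =>
      have hb := listMin_mem h
      have h1 := hlb b hb
      have h2 := listMin_le h a hmem
      have : b = a := le_antisymm h2 h1
      rw [this]

theorem listMin_congr_mem {xs ys : List Int} (h : ∀ x, x ∈ xs ↔ x ∈ ys) :
    listMin xs = listMin ys := by
  cases hx : listMin xs with
  | none =>
      rw [listMin_eq_none_iff] at hx; subst hx
      cases hy : listMin ys with
      | none => rfl
      | some b => have := (h b).mpr (listMin_mem hy); simp at this
  | some a =>
      exact (listMin_eq_some ((h a).mp (listMin_mem hx))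
        (fun x hxy => listMin_le hx x ((h x).mpr hxy))).symm

theorem rowMin_nil (y : Int) : rowMin [] y = none := rfl

theorem rowMin_cons (p : Int × Int) (ps : List (Int × Int)) (y : Int) :
    rowMin (p :: ps) y = if p.1 = y then omin (some p.2) (rowMin ps y) else rowMin ps y := by
  by_cases h : p.1 = y <;> simp [rowMin, h, listMin_cons]

theorem rowMin_append (ps qs : List (Int × Int)) (y : Int) :
    rowMin (ps ++ qs) y = omin (rowMin ps y) (rowMin qs y) := by
  induction ps with
  | nil => simp [rowMin_nil, omin_none_left]
  | cons p t ih =>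
      by_cases h : p.1 = y <;>
        simp [List.cons_append, rowMin_cons, h, ih, omin_assoc]

theorem rowMin_eq_none_of_forall {ps : List (Int × Int)} {y : Int}
    (h : ∀ p ∈ ps, p.1 ≠ y) : rowMin ps y = none := by
  unfold rowMin
  rw [listMin_eq_none_iff]
  simp only [List.map_eq_nil_iff, List.filter_eq_nil_iff]
  intro p hp
  simp [h p hp]

theorem rowMin_ne_none_of_mem {ps : List (Int × Int)} {p : Int × Int}
    (hp : p ∈ ps) : rowMin ps p.1 ≠ none := by
  intro h
  unfold rowMin at h
  rw [listMin_eq_none_iff, List.map_eq_nil_iff, List.filter_eq_nil_iff] at h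
  have := h p hp
  simp at this

theorem rowMin_congr_mem {ps qs : List (Int × Int)} (h : ∀ z, z ∈ ps ↔ z ∈ qs) (y : Int) :
    rowMin ps y = rowMin qs y := by
  apply listMin_congr_mem
  intro x
  simp only [List.mem_map, List.mem_filter]
  constructor
  · rintro ⟨p, ⟨hp, hk⟩, hv⟩; exact ⟨p, ⟨(h p).mp hp, hk⟩, hv⟩
  · rintro ⟨p, ⟨hp, hk⟩, hv⟩; exact ⟨p, ⟨(h p).mpr hp, hk⟩, hv⟩

theorem shiftG_none (da n : Int) : shiftG da n none = none := rfl
theorem shiftG_some (da n a : Int) :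
    shiftG da n (some a) = if a + da < n then some (a + da) else none := rfl

theorem shiftG_omin (da n : Int) (o1 o2 : Option Int) :
    shiftG da n (omin o1 o2) = omin (shiftG da n o1) (shiftG da n o2) := by
  cases o1 with
  | none => rw [omin_none_left, shiftG_none, omin_none_left]
  | some a =>
      cases o2 with
      | none => rw [omin_none_right, shiftG_none, omin_none_right]
      | some b =>
          rw [omin_some_some, shiftG_some, shiftG_some, shiftG_some]
          split_ifs <;> simp [omin_none_left, omin_none_right, omin_some_some] <;> omega

-- core characterization: folding contrib over a pair list
theorem fold_contrib_eq (da db n m : Int) (ps : List (Int × Int)) (y : Int) :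
    ps.foldl (fun acc p => omin acc (contrib da db n m p y)) none
      = omin (shiftG da n (rowMin ps y)) (if y < m then rowMin ps (y - db) else none) := by
  induction ps with
  | nil => simp [rowMin_nil, shiftG_none, omin_none_left]
  | cons p t ih =>
      simp only [List.foldl]
      rw [foldl_omin_generic (contrib da db n m · y) t (omin none (contrib da db n m p y)),
        omin_none_left, ih]
      have hA : shiftG da n (rowMin (p :: t) y)
          = omin (if p.1 = y ∧ p.2 + da < n then some (p.2 + da) else none)
                 (shiftG da n (rowMin t y)) := by
        rw [rowMin_cons]
        by_cases h : p.1 = y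
        · rw [if_pos h, shiftG_omin, shiftG_some]
          simp [h]
        · rw [if_neg h, if_neg (fun hc => h hc.1), omin_none_left]
      have hB : (if y < m then rowMin (p :: t) (y - db) else none)
          = omin (if p.1 + db = y ∧ p.1 + db < m then some p.2 else none)
                 (if y < m then rowMin t (y - db) else none) := by
        rw [rowMin_cons]
        by_cases hm : y < m
        · by_cases hk : p.1 = y - db
          · have hk' : p.1 + db = y := by omega
            simp [hm, hk, hk']
          · have hne : ¬ (p.1 + db = y ∧ p.1 + db < m) := by omega
            simp [hm, hk, hne, omin_none_left]
        · have hne : ¬ (p.1 + db = y ∧ p.1 + db < m) := by omega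
          simp [hm, hne, omin_none_left]
      rw [hA, hB, ← omin_omin_swap]
      rfl

-- the conditional-append loop building cands is a flatMap
theorem cands_eq_flatMap (da db n m : Int) (l : List (Int × Int)) :
    l.foldl (fun cs p =>
        let cs1 := if p.2 + da < n then cs ++ [(p.1, p.2 + da)] else cs
        if p.1 + db < m then cs1 ++ [(p.1 + db, p.2)] else cs1) []
      = l.flatMap (gB da db n m) := by
  have h : ∀ (acc : List (Int × Int)),
      l.foldl (fun cs p =>
        let cs1 := if p.2 + da < n then cs ++ [(p.1, p.2 + da)] else cs
        if p.1 + db < m then cs1 ++ [(p.1 + db, p.2)] else cs1) acc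
      = acc ++ l.flatMap (gB da db n m) := by
    induction l with
    | nil => simp
    | cons p t ih =>
        intro acc
        simp only [List.foldl, List.flatMap_cons]
        rw [ih]
        simp only [gB]
        by_cases h1 : p.2 + da < n <;> by_cases h2 : p.1 + db < m <;>
          simp [h1, h2, List.append_assoc]
  simpa using h []

theorem rowMin_flatMap {α : Type} (g : α → List (Int × Int)) (l : List α) (y : Int) :
    rowMin (l.flatMap g) y = l.foldl (fun acc p => omin acc (rowMin (g p) y)) none := by
  induction l with
  | nil => simp [rowMin_nil]
  | cons p t ih =>
      simp only [List.flatMap_cons, List.foldl]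
      rw [rowMin_append, ih,
        foldl_omin_generic (fun p => rowMin (g p) y) t (omin none (rowMin (g p) y)),
        omin_none_left]

theorem rowMin_single (q : Int × Int) (y : Int) :
    rowMin [q] y = if q.1 = y then some q.2 else none := by
  by_cases h : q.1 = y <;> simp [rowMin_cons, rowMin_nil, h, omin_none_right]

theorem rowMin_gB (da db n m : Int) (p : Int × Int) (y : Int) :
    rowMin (gB da db n m p) y = contrib da db n m p y := by
  unfold gB contrib
  rw [rowMin_append]
  congr 1
  · by_cases h1 : p.2 + da < n
    · rw [if_pos h1, rowMin_single]
      by_cases h3 : p.1 = y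
      · rw [if_pos h3, if_pos ⟨h3, h1⟩]
      · rw [if_neg h3, if_neg (fun hc => h3 hc.1)]
    · rw [if_neg h1, if_neg (fun hc => h1 hc.2)]
      exact rowMin_nil y
  · by_cases h2 : p.1 + db < m
    · rw [if_pos h2, rowMin_single]
      by_cases h4 : p.1 + db = y
      · rw [if_pos h4, if_pos ⟨h4, h2⟩]
      · rw [if_neg h4, if_neg (fun hc => h4 hc.1)]
    · rw [if_neg h2, if_neg (fun hc => h2 hc.2)]
      exact rowMin_nil y

-- the upsert body of stepB, pointwise
theorem get?_upsert (d : PySem.Dict Int Int) (kv : Int × Int) (k : Int) :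
    (match d.get? kv.1 with
      | none => d.insert kv.1 kv.2
      | some w => if kv.2 < w then d.insert kv.1 kv.2 else d).get? k
      = if k = kv.1 then omin (d.get? k) (some kv.2) else d.get? k := by
  cases h : d.get? kv.1 with
  | none =>
      simp only [h]
      rw [PySem.Dict.get?_insert]
      by_cases hk : k = kv.1
      · rw [if_pos hk, if_pos hk, hk, h]; rfl
      · rw [if_neg hk, if_neg hk]
  | some w =>
      simp only [h]
      by_cases hlt : kv.2 < w
      · rw [if_pos hlt, PySem.Dict.get?_insert]
        by_cases hk : k = kv.1
        · rw [if_pos hk, if_pos hk, hk, h, omin_some_some]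
          congr 1; omega
        · rw [if_neg hk, if_neg hk]
      · rw [if_neg hlt]
        by_cases hk : k = kv.1
        · rw [if_pos hk, hk, h, omin_some_some]
          congr 1; omega
        · rw [if_neg hk]

theorem nodup_upsert (d : PySem.Dict Int Int) (kv : Int × Int) (h : d.keys.Nodup) :
    (match d.get? kv.1 with
      | none => d.insert kv.1 kv.2
      | some w => if kv.2 < w then d.insert kv.1 kv.2 else d).keys.Nodup := by
  cases hg : d.get? kv.1 with
  | none => exact PySem.Dict.nodup_keys_insert _ _ _ h
  | some w =>
      by_cases hlt : kv.2 < w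
      · simpa [hlt] using PySem.Dict.nodup_keys_insert d kv.1 kv.2 h
      · simpa [hlt] using h

theorem get?_upsert_fold (cands : List (Int × Int)) (d : PySem.Dict Int Int) (k : Int) :
    (cands.foldl (fun nx kv =>
        match nx.get? kv.1 with
        | none => nx.insert kv.1 kv.2
        | some w => if kv.2 < w then nx.insert kv.1 kv.2 else nx) d).get? k
      = omin (d.get? k) (rowMin cands k) := by
  induction cands generalizing d with
  | nil => simp [rowMin_nil, omin_none_right]
  | cons p t ih =>
      simp only [List.foldl]
      rw [ih, get?_upsert, rowMin_cons]
      by_cases h : k = p.1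
      · rw [if_pos h, if_pos h.symm, omin_assoc]
      · rw [if_neg h, if_neg (fun hh => h hh.symm)]

theorem nodup_upsert_fold (cands : List (Int × Int)) (d : PySem.Dict Int Int)
    (h : d.keys.Nodup) :
    (cands.foldl (fun nx kv =>
        match nx.get? kv.1 with
        | none => nx.insert kv.1 kv.2
        | some w => if kv.2 < w then nx.insert kv.1 kv.2 else nx) d).keys.Nodup := by
  induction cands generalizing d with
  | nil => exact h
  | cons p t ih => exact ih _ (nodup_upsert d p h)

-- with unique keys, first-match lookup = per-key minimum of the items
theorem get?_mk_eq_rowMin (l : List (Int × Int)) (h : (l.map (·.1)).Nodup) (y : Int) :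
    (PySem.Dict.mk l).get? y = rowMin l y := by
  induction l with
  | nil => rfl
  | cons p t ih =>
      simp only [List.map_cons, List.nodup_cons] at h
      rw [PySem.Dict.get?_mk_cons, rowMin_cons]
      by_cases hk : p.1 = y
      · rw [if_pos hk]
        have hnone : rowMin t y = none := by
          apply rowMin_eq_none_of_forall
          intro q hq hqy
          exact h.1 (by rw [hk, ← hqy]; exact List.mem_map_of_mem hq)
        rw [hnone, omin_none_right, if_pos (by simp [hk])]
      · rw [if_neg hk, if_neg (by simp [hk]), ih h.2]

theorem get?_eq_rowMin_items (d : PySem.Dict Int Int) (h : d.keys.Nodup) (y : Int) :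
    d.get? y = rowMin d.items y := by
  cases d with
  | mk l => exact get?_mk_eq_rowMin l h y

-- B side: get? of one stepB in closed form
theorem get?_stepB (n m : Int) (d : PySem.Dict Int Int) (info : Int × Int)
    (h : d.keys.Nodup) (y : Int) :
    (stepB n m d info).get? y
      = omin (shiftG info.1 n (d.get? y)) (if y < m then d.get? (y - info.2) else none) := by
  unfold stepB
  rw [cands_eq_flatMap, get?_upsert_fold, PySem.Dict.get?_empty, omin_none_left,
    rowMin_flatMap]
  have : (fun (acc : Option Int) (p : Int × Int) => omin acc (rowMin (gB info.1 info.2 n m p) y))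
      = (fun acc p => omin acc (contrib info.1 info.2 n m p y)) := by
    funext acc p; rw [rowMin_gB]
  rw [this, fold_contrib_eq, ← get?_eq_rowMin_items d h, ← get?_eq_rowMin_items d h]

theorem nodup_stepB (n m : Int) (d : PySem.Dict Int Int) (info : Int × Int) :
    (stepB n m d info).keys.Nodup := by
  unfold stepB
  exact nodup_upsert_fold _ _ PySem.Dict.nodup_keys_empty

-- A side: membership in one stepA
theorem mem_stepA (n m : Int) (cs : PySem.Set (Int × Int)) (info : Int × Int)
    (z : Int × Int) :
    z ∈ stepA n m cs info
      ↔ ∃ p ∈ cs, (z = (p.1 + info.1, p.2) ∧ p.1 + info.1 < n)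
          ∨ (z = (p.1, p.2 + info.2) ∧ p.2 + info.2 < m) := by
  have aux : ∀ (cs : List (Int × Int)) (s : PySem.Set (Int × Int)),
      z ∈ cs.foldl (fun nc c =>
        let nc1 := if c.1 + info.1 < n then PySem.Set.add nc (c.1 + info.1, c.2) else nc
        if c.2 + info.2 < m then PySem.Set.add nc1 (c.1, c.2 + info.2) else nc1) s
      ↔ z ∈ s ∨ ∃ p ∈ cs, (z = (p.1 + info.1, p.2) ∧ p.1 + info.1 < n)
          ∨ (z = (p.1, p.2 + info.2) ∧ p.2 + info.2 < m) := by
    intro cs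
    induction cs with
    | nil => simp
    | cons c t ih =>
        intro s
        simp only [List.foldl]
        rw [ih]
        have hbody : z ∈ (let nc1 := if c.1 + info.1 < n then PySem.Set.add s (c.1 + info.1, c.2) else s
            if c.2 + info.2 < m then PySem.Set.add nc1 (c.1, c.2 + info.2) else nc1)
            ↔ z ∈ s ∨ ((z = (c.1 + info.1, c.2) ∧ c.1 + info.1 < n)
                ∨ (z = (c.1, c.2 + info.2) ∧ c.2 + info.2 < m)) := by
          by_cases h1 : c.1 + info.1 < n <;> by_cases h2 : c.2 + info.2 < m <;>
            simp [h1, h2, PySem.Set.mem_add] <;> tauto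
        rw [hbody]
        simp only [List.mem_cons]
        constructor
        · rintro ((hz | hz) | ⟨p, hp, hor⟩)
          · exact Or.inl hz
          · exact Or.inr ⟨c, Or.inl rfl, hz⟩
          · exact Or.inr ⟨p, Or.inr hp, hor⟩
        · rintro (hz | ⟨p, (rfl | hp), hor⟩)
          · exact Or.inl (Or.inl hz)
          · exact Or.inl (Or.inr hor)
          · exact Or.inr ⟨p, hp, hor⟩
  unfold stepA
  rw [aux cs PySem.Set.empty]
  simp [PySem.Set.empty]

theorem mem_gB {da db n m : Int} {q z : Int × Int} :
    z ∈ gB da db n m q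
      ↔ (z = (q.1, q.2 + da) ∧ q.2 + da < n) ∨ (z = (q.1 + db, q.2) ∧ q.1 + db < m) := by
  unfold gB
  by_cases h1 : q.2 + da < n <;> by_cases h2 : q.1 + db < m <;>
    simp [h1, h2] <;> tauto

theorem colMin_stepA (n m : Int) (cs : PySem.Set (Int × Int)) (info : Int × Int) (y : Int) :
    colMin (stepA n m cs info) y
      = omin (shiftG info.1 n (colMin cs y)) (if y < m then colMin cs (y - info.2) else none) := by
  have hmem : ∀ z, z ∈ (stepA n m cs info).map (fun p => (p.2, p.1))
      ↔ z ∈ (cs.map (fun p => (p.2, p.1))).flatMap (gB info.1 info.2 n m) := by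
    intro z
    simp only [List.mem_map, List.mem_flatMap, mem_stepA, mem_gB]
    constructor
    · rintro ⟨w, ⟨p, hp, hor⟩, rfl⟩
      refine ⟨(p.2, p.1), ⟨p, hp, rfl⟩, ?_⟩
      rcases hor with ⟨rfl, hlt⟩ | ⟨rfl, hlt⟩
      · exact Or.inl ⟨rfl, hlt⟩
      · exact Or.inr ⟨rfl, hlt⟩
    · rintro ⟨q, ⟨p, hp, rfl⟩, hor⟩
      rcases hor with ⟨rfl, hlt⟩ | ⟨rfl, hlt⟩
      · exact ⟨(p.1 + info.1, p.2), ⟨p, hp, Or.inl ⟨rfl, hlt⟩⟩, rfl⟩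
      · exact ⟨(p.1, p.2 + info.2), ⟨p, hp, Or.inr ⟨rfl, hlt⟩⟩, rfl⟩
  unfold colMin
  rw [rowMin_congr_mem hmem y, rowMin_flatMap]
  have hfun : (fun (acc : Option Int) (q : Int × Int) =>
        omin acc (rowMin (gB info.1 info.2 n m q) y))
      = (fun acc q => omin acc (contrib info.1 info.2 n m q y)) := by
    funext acc q; rw [rowMin_gB]
  rw [hfun, fold_contrib_eq]

-- the coupled invariant survives the whole fold over infos
theorem inv_fold (n m : Int) (infos : List (Int × Int)) (cs : PySem.Set (Int × Int))
    (d : PySem.Dict Int Int) (hnd : d.keys.Nodup) (hinv : ∀ y, d.get? y = colMin cs y) :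
    (infos.foldl (stepB n m) d).keys.Nodup ∧
      ∀ y, (infos.foldl (stepB n m) d).get? y = colMin (infos.foldl (stepA n m) cs) y := by
  induction infos generalizing cs d with
  | nil => exact ⟨hnd, hinv⟩
  | cons info t ih =>
      apply ih _ _ (nodup_stepB n m d info)
      intro y
      rw [get?_stepB n m d info hnd y, colMin_stepA, hinv, hinv]

theorem listMin_cons_foldl (x : Int) (t : List Int) :
    listMin (x :: t) = some (t.foldl min x) := by
  induction t generalizing x with
  | nil => rfl
  | cons b t ih =>
      rw [listMin_cons, ih, omin_some_some, List.foldl_cons, List.foldl_assoc]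

theorem min?_id_eq_listMin (xs : List Int) :
    PySem.List.min? xs (fun x => x) = listMin xs := by
  cases xs with
  | nil => rfl
  | cons x t => rw [PySem.List.min?_id_cons, listMin_cons_foldl]

theorem rowMin_eq_some_mem {ps : List (Int × Int)} {y w : Int}
    (h : rowMin ps y = some w) : ∃ p ∈ ps, p.1 = y ∧ p.2 = w := by
  have := listMin_mem h
  simp only [List.mem_map, List.mem_filter] at this
  obtain ⟨p, ⟨hp, hk⟩, hv⟩ := this
  exact ⟨p, hp, by simpa using hk, hv⟩

theorem rowMin_le_val {ps : List (Int × Int)} {y w : Int}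
    (h : rowMin ps y = some w) : ∀ p ∈ ps, p.1 = y → w ≤ p.2 := by
  intro p hp hk
  apply listMin_le h p.2
  simp only [List.mem_map, List.mem_filter]
  exact ⟨p, ⟨hp, by simp [hk]⟩, rfl⟩

theorem colMin_eq_some_mem {cs : List (Int × Int)} {y w : Int}
    (h : colMin cs y = some w) : ∃ p ∈ cs, p.2 = y ∧ p.1 = w := by
  obtain ⟨q, hq, hk, hv⟩ := rowMin_eq_some_mem h
  simp only [List.mem_map] at hq
  obtain ⟨p, hp, rfl⟩ := hq
  exact ⟨p, hp, hk, hv⟩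

theorem colMin_le_val {cs : List (Int × Int)} {y w : Int}
    (h : colMin cs y = some w) : ∀ p ∈ cs, p.2 = y → w ≤ p.1 := by
  intro p hp hk
  exact rowMin_le_val h (p.2, p.1) (List.mem_map_of_mem hp) hk

theorem colMin_ne_none_of_mem {cs : List (Int × Int)} {p : Int × Int}
    (hp : p ∈ cs) : colMin cs p.2 ≠ none := by
  intro hnone
  have hm : ((p.2, p.1) : Int × Int) ∈ cs.map (fun p => (p.2, p.1)) :=
    List.mem_map_of_mem hp
  exact rowMin_ne_none_of_mem hm (by unfold colMin at hnone; exact hnone)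

theorem dict_values_def (d : PySem.Dict Int Int) : d.values = d.items.map (·.2) := rfl

-- the per-key minima stored in the dict have the same minimum as all first components
theorem values_listMin_eq (C : List (Int × Int)) (D : PySem.Dict Int Int)
    (hnd : D.keys.Nodup) (hinv : ∀ y, D.get? y = colMin C y) :
    listMin D.values = listMin (C.map (·.1)) := by
  cases hC : listMin (C.map (·.1)) with
  | none =>
      rw [listMin_eq_none_iff, List.map_eq_nil_iff] at hC
      cases hI : D.items with
      | nil => rw [dict_values_def, hI]; rfl
      | cons p t =>
          exfalso
          have h1 : D.get? p.1 = none := by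
            rw [hinv p.1, hC]; rfl
          rw [get?_eq_rowMin_items D hnd] at h1
          exact rowMin_ne_none_of_mem (by rw [hI]; exact List.mem_cons_self) h1
  | some v =>
      have hvmem := listMin_mem hC
      simp only [List.mem_map] at hvmem
      obtain ⟨q, hqC, hq1⟩ := hvmem
      have hlb : ∀ x ∈ C.map (·.1), v ≤ x := listMin_le hC
      obtain ⟨w, hw⟩ : ∃ w, colMin C q.2 = some w := by
        cases hcm : colMin C q.2 with
        | none => exact absurd hcm (colMin_ne_none_of_mem hqC)
        | some w => exact ⟨w, rfl⟩
      have hwv : w = v := by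
        obtain ⟨r, hrC, _, hr1⟩ := colMin_eq_some_mem hw
        have h1 : v ≤ w := hr1 ▸ hlb r.1 (List.mem_map_of_mem hrC)
        have h2 : w ≤ v := hq1 ▸ colMin_le_val hw q hqC rfl
        omega
      subst hwv
      apply listMin_eq_some
      · have hg : D.get? q.2 = some w := by rw [hinv q.2, hw]
        have := PySem.Dict.mem_items_of_get?_eq_some D hg
        rw [dict_values_def]
        exact List.mem_map_of_mem this
      · intro u hu
        rw [dict_values_def] at hu
        simp only [List.mem_map] at hu
        obtain ⟨r, hrI, hr2⟩ := hu
        have hg : D.get? r.1 = some r.2 :=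
          PySem.Dict.get?_of_mem_items D (by simpa using hrI) hnd
        have hcm : colMin C r.1 = some r.2 := by rw [← hinv r.1]; exact hg
        obtain ⟨p, hpC, _, hp1⟩ := colMin_eq_some_mem hcm
        have := hlb p.1 (List.mem_map_of_mem hpC)
        omega

-- ===== VERDICT (by name: the statement is the Claim_ definition above) =====
theorem solution_spec : Claim_equal_solution := by
  unfold Claim_equal_solution
  intro infos n m _
  unfold Spec_solution
  have hnd0 : (PySem.Dict.empty.insert (0 : Int) (0 : Int)).keys.Nodup :=
    PySem.Dict.nodup_keys_insert _ _ _ PySem.Dict.nodup_keys_empty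
  have h0 : ∀ y, (PySem.Dict.empty.insert (0 : Int) (0 : Int)).get? y
      = colMin (PySem.Set.ofList [((0 : Int), (0 : Int))]) y := by
    intro y
    rw [PySem.Dict.get?_insert]
    have hcol : colMin (PySem.Set.ofList [((0 : Int), (0 : Int))]) y
        = if (0 : Int) = y then some (0 : Int) else none :=
      rowMin_single ((0 : Int), (0 : Int)) y
    rw [hcol]
    by_cases hy : y = (0 : Int)
    · rw [if_pos hy, if_pos hy.symm]
    · rw [if_neg hy, if_neg (fun h => hy h.symm), PySem.Dict.get?_empty]
  obtain ⟨hnd, hinv⟩ :=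
    inv_fold n m infos (PySem.Set.ofList [((0 : Int), (0 : Int))]) _ hnd0 h0
  simp only [solution, solution_alt]
  set C := infos.foldl (stepA n m) (PySem.Set.ofList [((0 : Int), (0 : Int))]) with hCdef
  set D := infos.foldl (stepB n m) (PySem.Dict.empty.insert (0 : Int) (0 : Int)) with hDdef
  have hvals : listMin D.values = listMin (C.map (·.1)) := values_listMin_eq C D hnd hinv
  by_cases hc : C = []
  · have hitems : D.items = [] := by
      cases hI : D.items with
      | nil => rfl
      | cons p t =>
          exfalso
          have h1 : D.get? p.1 = none := by rw [hinv p.1, hc]; rfl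
          rw [get?_eq_rowMin_items D hnd] at h1
          exact rowMin_ne_none_of_mem (by rw [hI]; exact List.mem_cons_self) h1
    rw [if_pos (by simp [hc]), if_pos (by simp [hitems])]
  · have hCne : listMin (C.map (·.1)) ≠ none := by
      intro h
      rw [listMin_eq_none_iff, List.map_eq_nil_iff] at h
      exact hc h
    have hDne : D.items ≠ [] := by
      intro hI
      apply hCne
      rw [← hvals, dict_values_def, hI]
      rfl
    rw [if_neg (by simpa using hc), if_neg (by simpa using hDne),
      min?_id_eq_listMin, min?_id_eq_listMin, hvals]
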